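-- pv_equiv track=rewrite | github.com/cyrillOCR/Feature-Extraction | modules/sum_horizontal_margins_top_bottom.py | sum_horizontal_margins_top_bottom
-- ===== SOURCE A (Python) =====
-- max_black = 200
--
-- def sum_horizontal_margins_top_bottom(image):
--     sum = 0
--
--     for i in range(0, len(image[0])-1):
--         ok = True
--         for j in range(0, len(image)):
--             if image[j][i] == 255:
--                 ok = True
--             elif image[j][i] <= max_black and ok == True:
--                 sum += j
--                 ok = False
--
--     return sum
-- ===== SOURCE B (Python) =====
-- max_black = 200
--
-- def sum_horizontal_margins_top_bottom(image):
--     # Row-major single sweep with a per-column "armed" flag vector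
--     # (A scans column-by-column; B scans row-by-row keeping all column states).
--     n = len(image[0]) - 1
--     armed = [True] * n
--     total = 0
--     for j, row in enumerate(image):
--         new_armed = []
--         for a, v in zip(armed, row[:n]):
--             if v == 255:
--                 new_armed.append(True)
--             elif v <= max_black and a:
--                 total += j
--                 new_armed.append(False)
--             else:
--                 new_armed.append(a)
--         armed = new_armed
--     return total
-- ===== Notes on version B (the rewrite author's own statement) =====
-- stated objective: alternative
-- what changed: Column-major double scan with one boolean per column at a time is replaced by a single row-major sweep that maintains a vector of per-column 'armed' flags, accumulating the sum in one pass over the image in the opposite traversal order.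
import Mathlib
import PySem

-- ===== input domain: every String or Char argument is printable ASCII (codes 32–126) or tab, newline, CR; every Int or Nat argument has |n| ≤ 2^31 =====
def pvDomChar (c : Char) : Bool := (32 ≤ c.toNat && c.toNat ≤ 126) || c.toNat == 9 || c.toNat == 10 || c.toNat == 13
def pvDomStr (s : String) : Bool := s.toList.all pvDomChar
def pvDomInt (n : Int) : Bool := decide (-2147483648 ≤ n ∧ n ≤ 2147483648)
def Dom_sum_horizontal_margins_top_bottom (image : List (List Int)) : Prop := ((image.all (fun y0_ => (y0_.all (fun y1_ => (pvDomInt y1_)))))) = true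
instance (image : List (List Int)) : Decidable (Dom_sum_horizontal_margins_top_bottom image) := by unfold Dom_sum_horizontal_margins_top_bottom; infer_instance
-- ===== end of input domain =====

-- B replaces A's column-major double scan by a single row-major sweep keeping a vector of
-- per-column "armed" flags (objective: alternative traversal/data structure, same cost).

-- ===== PORT A =====
def sum_horizontal_margins_top_bottom (image : List (List Int)) : Int :=
  (PySem.List.pyRange 0 (((PySem.List.pyGetD image 0 []).length : Int) - 1) 1).foldl
    (fun sum i =>
      ((PySem.List.pyRange 0 ((image.length : Int)) 1).foldl
        (fun (st : Int × Bool) j =>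
          if PySem.List.pyGetD (PySem.List.pyGetD image j []) i 0 = 255 then (st.1, true)
          else if PySem.List.pyGetD (PySem.List.pyGetD image j []) i 0 ≤ 200 ∧ st.2 = true then
            (st.1 + j, false)
          else st)
        (sum, true)).1)
    0

-- ===== PORT B =====
-- n is Python's len(image[0]) - 1; on the admitted inputs image ≠ [] so the Nat subtraction is exact.
def sum_horizontal_margins_top_bottom_alt (image : List (List Int)) : Int :=
  let n : Nat := (PySem.List.pyGetD image 0 []).length - 1
  ((PySem.List.enumerate image 0).foldl
    (fun (st : Int × List Bool) (jr : Int × List Int) =>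
      (st.2.zip (jr.2.take n)).foldl
        (fun (acc : Int × List Bool) (av : Bool × Int) =>
          if av.2 = 255 then (acc.1, acc.2 ++ [true])
          else if av.2 ≤ 200 ∧ av.1 = true then (acc.1 + jr.1, acc.2 ++ [false])
          else (acc.1, acc.2 ++ [av.1]))
        (st.1, ([] : List Bool)))
    (0, List.replicate n true)).1

-- ===== PRECONDITION & SPEC =====
-- Pre_ excludes exactly the inputs on which Python A raises IndexError: the empty image
-- (image[0] raises) and images with a row shorter than len(image[0])-1 (image[j][i] raises).
def Pre_sum_horizontal_margins_top_bottom (image : List (List Int)) : Prop :=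
  image ≠ [] ∧ ∀ row ∈ image, (PySem.List.pyGetD image 0 []).length - 1 ≤ row.length
instance (image : List (List Int)) : Decidable (Pre_sum_horizontal_margins_top_bottom image) := by
  unfold Pre_sum_horizontal_margins_top_bottom; infer_instance

def pvWitness_sum_horizontal_margins_top_bottom : List (List Int) :=
  [[255, 10], [100, 201], [0, 255]]

def Spec_sum_horizontal_margins_top_bottom (image : List (List Int)) (out : Int) : Prop :=
  out = sum_horizontal_margins_top_bottom_alt image
instance (image : List (List Int)) (out : Int) : Decidable (Spec_sum_horizontal_margins_top_bottom image out) := by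
  unfold Spec_sum_horizontal_margins_top_bottom; infer_instance

-- ===== CLAIM (what is proved, stated in full; the proofs are below) =====
def Claim_equal_sum_horizontal_margins_top_bottom : Prop :=
  ∀ (image : List (List Int)), Dom_sum_horizontal_margins_top_bottom image →
    Pre_sum_horizontal_margins_top_bottom image →
    Spec_sum_horizontal_margins_top_bottom image (sum_horizontal_margins_top_bottom image)

-- ===== LEMMAS AND PROOFS =====

-- the per-pixel transition step: (index contribution, new armed flag)
def stepP (j : Int) (a : Bool) (v : Int) : Int × Bool :=
  if v = 255 then (0, true) else if v ≤ 200 ∧ a = true then (j, false) else (0, a)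

def stepF (j : Int) (v : Int) (st : Int × Bool) : Int × Bool :=
  (st.1 + (stepP j st.2 v).1, (stepP j st.2 v).2)

def rowV (n : Nat) (p : Int × List Int) (sts : List (Int × Bool)) : List (Int × Bool) :=
  (sts.zip (p.2.take n)).map (fun q => stepF p.1 q.2 q.1)

def foldS (n : Nat) (L : List (Int × List Int)) (sts : List (Int × Bool)) : List (Int × Bool) :=
  L.foldl (fun sts p => rowV n p sts) sts

lemma stepA_eq (j v : Int) (st : Int × Bool) :
    (if v = 255 then (st.1, true)
     else if v ≤ 200 ∧ st.2 = true then (st.1 + j, false)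
     else st) = stepF j v st := by
  unfold stepF stepP; split_ifs <;> simp

lemma foldl_shift {α : Type} (step : (Int × Bool) → α → Int × Bool)
    (h : ∀ s b x, step (s, b) x = (s + (step (0, b) x).1, (step (0, b) x).2))
    (L : List α) : ∀ (s : Int) (b : Bool),
    L.foldl step (s, b) = (s + (L.foldl step (0, b)).1, (L.foldl step (0, b)).2) := by
  induction L with
  | nil => intro s b; simp
  | cons x L ih =>
    intro s b
    simp only [List.foldl_cons]
    rw [h s b x]
    rcases hd : step (0, b) x with ⟨d1, d2⟩
    rw [ih (s + d1) d2, ih d1 d2]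
    simp [add_assoc]

lemma foldB_inner (j : Int) (l : List (Bool × Int)) : ∀ (t : Int) (acc : List Bool),
    l.foldl
      (fun (acc : Int × List Bool) (av : Bool × Int) =>
        if av.2 = 255 then (acc.1, acc.2 ++ [true])
        else if av.2 ≤ 200 ∧ av.1 = true then (acc.1 + j, acc.2 ++ [false])
        else (acc.1, acc.2 ++ [av.1])) (t, acc)
    = (t + (l.map (fun av => (stepP j av.1 av.2).1)).sum,
       acc ++ l.map (fun av => (stepP j av.1 av.2).2)) := by
  induction l with
  | nil => intro t acc; simp
  | cons av l ih =>
    intro t acc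
    rcases av with ⟨a, v⟩
    by_cases h1 : v = 255
    · simp [h1, ih, stepP]
    · by_cases h2 : v ≤ 200 ∧ a = true
      · simp [h1, h2, ih, stepP]
        ring
      · simp [h1, h2, ih, stepP]

lemma rowV_length (n : Nat) (p : Int × List Int) (sts : List (Int × Bool))
    (hs : sts.length = n) (hr : n ≤ p.2.length) : (rowV n p sts).length = n := by
  simp [rowV, hs]; omega

lemma rowB (j : Int) (row : List Int) (n : Nat) (sts : List (Int × Bool))
    (hs : sts.length = n) (hr : n ≤ row.length) :
    ((sts.map (·.2)).zip (row.take n)).foldl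
      (fun (acc : Int × List Bool) (av : Bool × Int) =>
        if av.2 = 255 then (acc.1, acc.2 ++ [true])
        else if av.2 ≤ 200 ∧ av.1 = true then (acc.1 + j, acc.2 ++ [false])
        else (acc.1, acc.2 ++ [av.1])) ((sts.map (·.1)).sum, ([] : List Bool))
    = (((rowV n (j, row) sts).map (·.1)).sum, (rowV n (j, row) sts).map (·.2)) := by
  have hlen : sts.length ≤ (row.take n).length := by simp [hs]; omega
  have hzip : (sts.map (·.2)).zip (row.take n)
      = (sts.zip (row.take n)).map (fun q => (q.1.2, q.2)) := by
    rw [List.zip_map_left]; rfl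
  have h2 : (rowV n (j, row) sts).map (·.2)
      = (sts.zip (row.take n)).map (fun q => (stepP j q.1.2 q.2).2) := by
    simp only [rowV, List.map_map]
    exact List.map_congr_left (fun q _ => by simp [stepF])
  have h1 : ((rowV n (j, row) sts).map (·.1)).sum
      = (sts.map (·.1)).sum + ((sts.zip (row.take n)).map (fun q => (stepP j q.1.2 q.2).1)).sum := by
    have hm : (rowV n (j, row) sts).map (·.1)
        = (sts.zip (row.take n)).map (fun q => q.1.1 + (stepP j q.1.2 q.2).1) := by
      simp only [rowV, List.map_map]
      exact List.map_congr_left (fun q _ => by simp [stepF])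
    have hfst : (sts.zip (row.take n)).map (fun q => q.1.1) = sts.map (·.1) := by
      have hz := List.map_fst_zip hlen (l₂ := row.take n) (l₁ := sts)
      calc (sts.zip (row.take n)).map (fun q => q.1.1)
          = ((sts.zip (row.take n)).map Prod.fst).map (·.1) := by rw [List.map_map]; rfl
        _ = sts.map (·.1) := by rw [hz]
    rw [hm, List.sum_map_add, hfst]
  rw [hzip, foldB_inner, List.map_map, List.map_map, h1, h2]
  simp [Function.comp_def]

lemma foldS_sum (n : Nat) (L : List (Int × List Int)) : ∀ (sts : List (Int × Bool)),
    sts.length = n → (∀ p ∈ L, n ≤ p.2.length) →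
    L.foldl
      (fun (st : Int × List Bool) (jr : Int × List Int) =>
        (st.2.zip (jr.2.take n)).foldl
          (fun (acc : Int × List Bool) (av : Bool × Int) =>
            if av.2 = 255 then (acc.1, acc.2 ++ [true])
            else if av.2 ≤ 200 ∧ av.1 = true then (acc.1 + jr.1, acc.2 ++ [false])
            else (acc.1, acc.2 ++ [av.1]))
          (st.1, ([] : List Bool)))
      ((sts.map (·.1)).sum, sts.map (·.2))
    = (((foldS n L sts).map (·.1)).sum, (foldS n L sts).map (·.2)) := by
  induction L with
  | nil => intro sts _ _; simp [foldS]
  | cons p L ih =>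
    intro sts hs hL
    have hp : n ≤ p.2.length := hL p (by simp)
    simp only [List.foldl_cons]
    rw [rowB p.1 p.2 n sts hs hp]
    rw [ih (rowV n p sts) (rowV_length n p sts hs hp) (fun q hq => hL q (by simp [hq]))]
    simp [foldS]

lemma rowV_range (n : Nat) (p : Int × List Int) (f : Nat → Int × Bool)
    (hr : n ≤ p.2.length) :
    rowV n p ((List.range n).map f)
    = (List.range n).map (fun (i : Nat) => stepF p.1 (PySem.List.pyGetD p.2 (i : Int) 0) (f i)) := by
  apply List.ext_getElem
  · simp [rowV]; omega
  · intro i h1 h2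
    have hi : i < n := by simpa using h2
    have hip : i < p.2.length := lt_of_lt_of_le hi hr
    simp [rowV, List.getElem_zip, List.getElem_take, PySem.List.pyGetD_natCast,
      List.getD_eq_getElem?_getD, List.getElem?_eq_getElem hip]

lemma foldS_cols (n : Nat) (L : List (Int × List Int)) :
    ∀ (f : Nat → Int × Bool), (∀ p ∈ L, n ≤ p.2.length) →
    foldS n L ((List.range n).map f)
    = (List.range n).map (fun (i : Nat) =>
        L.foldl (fun st p => stepF p.1 (PySem.List.pyGetD p.2 (i : Int) 0) st) (f i)) := by
  induction L with
  | nil => intro f _; simp [foldS]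
  | cons p L ih =>
    intro f hL
    have hp : n ≤ p.2.length := hL p (by simp)
    show foldS n L (rowV n p ((List.range n).map f)) = _
    rw [rowV_range n p f hp,
        ih (fun (i : Nat) => stepF p.1 (PySem.List.pyGetD p.2 (i : Int) 0) (f i))
          (fun q hq => hL q (by simp [hq]))]
    simp

-- the per-column fold both sides reduce to
def colFold (image : List (List Int)) (i : Int) : Int × Bool :=
  (PySem.List.pyRange 0 ((image.length : Int)) 1).foldl
    (fun st j => stepF j (PySem.List.pyGetD (PySem.List.pyGetD image j []) i 0) st) (0, true)

lemma foldl_body_add {α : Type} (f : Int → α → Int) (c : α → Int)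
    (h : ∀ s x, f s x = s + c x) (L : List α) : ∀ (s : Int), L.foldl f s = s + (L.map c).sum := by
  induction L with
  | nil => intro s; simp
  | cons x L ih => intro s; simp only [List.foldl_cons, List.map_cons, List.sum_cons, h s x, ih]; ring

lemma a_eq_sum (image : List (List Int)) :
    sum_horizontal_margins_top_bottom image
    = ((List.range ((PySem.List.pyGetD image 0 []).length - 1)).map
        (fun (k : Nat) => (colFold image (k : Int)).1)).sum := by
  have hstep : ∀ (sum i : Int),
      (fun (sum : Int) (i : Int) =>
        ((PySem.List.pyRange 0 ((image.length : Int)) 1).foldl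
          (fun (st : Int × Bool) j =>
            if PySem.List.pyGetD (PySem.List.pyGetD image j []) i 0 = 255 then (st.1, true)
            else if PySem.List.pyGetD (PySem.List.pyGetD image j []) i 0 ≤ 200 ∧ st.2 = true then
              (st.1 + j, false)
            else st)
          (sum, true)).1) sum i
      = sum + (colFold image i).1 := by
    intro sum i
    have hl : (fun (st : Int × Bool) j =>
          if PySem.List.pyGetD (PySem.List.pyGetD image j []) i 0 = 255 then (st.1, true)
          else if PySem.List.pyGetD (PySem.List.pyGetD image j []) i 0 ≤ 200 ∧ st.2 = true then
            (st.1 + j, false)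
          else st)
        = (fun (st : Int × Bool) j => stepF j (PySem.List.pyGetD (PySem.List.pyGetD image j []) i 0) st) := by
      funext st j; exact stepA_eq j _ st
    show ((PySem.List.pyRange 0 ((image.length : Int)) 1).foldl _ (sum, true)).1 = _
    rw [hl, foldl_shift _ (fun s b x => by simp [stepF]) _ sum true]
    rfl
  unfold sum_horizontal_margins_top_bottom
  rw [foldl_body_add _ (fun (i : Int) => (colFold image i).1) hstep]
  rw [PySem.List.pyRange_one]
  simp only [List.map_map]
  simp [Function.comp_def]

lemma b_eq_sum (image : List (List Int))
    (hpre : Pre_sum_horizontal_margins_top_bottom image) :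
    sum_horizontal_margins_top_bottom_alt image
    = ((List.range ((PySem.List.pyGetD image 0 []).length - 1)).map
        (fun (k : Nat) => (colFold image (k : Int)).1)).sum := by
  obtain ⟨hne, hrows⟩ := hpre
  set n : Nat := (PySem.List.pyGetD image 0 []).length - 1 with hn
  set L : List (Int × List Int) := PySem.List.enumerate image 0 with hLdef
  have hL : ∀ p ∈ L, n ≤ p.2.length := by
    intro p hp
    rw [hLdef, PySem.List.mem_enumerate_iff] at hp
    obtain ⟨k, hk, rfl⟩ := hp
    exact hrows _ (List.getElem_mem hk)
  have hinit : (((0 : Int), List.replicate n (true : Bool)) : Int × List Bool)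
      = ((((List.range n).map (fun _ => ((0 : Int), true))).map (·.1)).sum,
         ((List.range n).map (fun _ => ((0 : Int), true))).map (·.2)) := by
    simp [List.map_const']
  unfold sum_horizontal_margins_top_bottom_alt
  simp only [← hn, ← hLdef]
  rw [hinit]
  rw [foldS_sum n L ((List.range n).map (fun _ => ((0 : Int), true))) (by simp)
      hL]
  rw [foldS_cols n L (fun _ => ((0 : Int), true)) hL]
  simp only [List.map_map]
  congr 1
  refine List.map_congr_left (fun k hk => ?_)
  -- per-column fold over enumerated rows equals colFold
  simp only [Function.comp]
  rw [hLdef, PySem.List.enumerate_eq_map_pyRange (d := ([] : List Int)), List.foldl_map]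
  rfl

-- ===== VERDICT (by name: the statement is the Claim_ definition above) =====
theorem sum_horizontal_margins_top_bottom_spec : Claim_equal_sum_horizontal_margins_top_bottom := by
  intro image _ hpre
  unfold Spec_sum_horizontal_margins_top_bottom
  rw [a_eq_sum image, b_eq_sum image hpre]
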